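-- pv_equiv track=rewrite | github.com/Alkhithr/Mary | BUCI021S7/work.py | get_digit_sequences_from_string
-- ===== SOURCE A (Python) =====
-- def get_digit_sequences_from_string(string_input):
--     # keeping result as string to include leading zeros
--     result = ''
--     # this is to make string processing easier in the event the last character is numeric
--     string_input += '_'
--
--     for i in range(1, len(string_input)):
--         previous_char = string_input[i-1]
--         current_char = string_input[i]
--
--         if previous_char.isdigit():
--             result += str(previous_char)
--
--         if current_char.isdigit() is False and previous_char.isdigit():
--             result += '\n'
--
--     return result
-- ===== SOURCE B (Python) =====
-- from itertools import groupby
--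
-- def get_digit_sequences_from_string(string_input):
--     parts = []
--     for is_digit, group in groupby(string_input, key=str.isdigit):
--         if is_digit:
--             parts.append(''.join(group))
--             parts.append('\n')
--     return ''.join(parts)
-- ===== Notes on version B (the rewrite author's own statement) =====
-- stated objective: idiomatic
-- what changed: Replaces the sentinel-append and index loop over adjacent character pairs by itertools.groupby grouping maximal isdigit runs, joining each digit group plus a newline and joining the parts once at the end.
import Mathlib
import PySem

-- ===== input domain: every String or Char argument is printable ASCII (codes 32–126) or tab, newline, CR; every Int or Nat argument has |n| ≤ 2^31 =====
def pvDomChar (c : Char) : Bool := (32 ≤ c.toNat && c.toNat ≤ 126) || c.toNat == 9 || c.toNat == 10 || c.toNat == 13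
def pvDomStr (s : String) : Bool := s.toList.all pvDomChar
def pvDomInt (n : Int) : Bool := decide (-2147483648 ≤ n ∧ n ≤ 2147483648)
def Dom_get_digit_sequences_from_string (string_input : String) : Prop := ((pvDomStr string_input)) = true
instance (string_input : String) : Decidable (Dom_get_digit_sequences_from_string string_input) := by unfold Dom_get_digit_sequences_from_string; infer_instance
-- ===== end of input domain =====

-- B replaces A's sentinel-append and index loop over adjacent character pairs by grouping maximal digit runs (idiomatic decomposition).
-- ===== PORT A =====
-- the loop 'for i in range(1, len(string_input))' walked as the (previous_char, current_char) pairs of the sentinel-extended string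
def pvA_loop : Char → List Char → List Char → List Char
  | _, [], acc => acc
  | prev, cur :: rest, acc =>
      let acc1 := if PySem.Chars.isdigit prev then acc ++ [prev] else acc
      let acc2 := if (!PySem.Chars.isdigit cur) && PySem.Chars.isdigit prev then acc1 ++ ['\n'] else acc1
      pvA_loop cur rest acc2

def get_digit_sequences_from_string (string_input : String) : String :=
  -- string_input += '_'
  match string_input.toList ++ ['_'] with
  | [] => ""            -- unreachable: the extended string is nonempty
  | c :: rest => String.ofList (pvA_loop c rest [])

-- ===== PORT B =====
-- groupby(string_input, key=str.isdigit): each maximal digit run joined, followed by '\n'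
def pvB_go : List Char → List Char
  | [] => []
  | c :: rest =>
      if h : PySem.Chars.isdigit c then
        ((c :: rest).takeWhile PySem.Chars.isdigit) ++ '\n' ::
          pvB_go ((c :: rest).dropWhile PySem.Chars.isdigit)
      else pvB_go rest
termination_by l => l.length
decreasing_by
  · simp only [List.dropWhile_cons, h, if_pos]
    exact Nat.lt_succ_of_le (List.length_dropWhile_le _ _)
  · simp

def get_digit_sequences_from_string_alt (string_input : String) : String :=
  String.ofList (pvB_go string_input.toList)

-- ===== PRECONDITION & SPEC =====
def Spec_get_digit_sequences_from_string (string_input : String) (out : String) : Prop := out = get_digit_sequences_from_string_alt string_input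
instance (string_input : String) (out : String) : Decidable (Spec_get_digit_sequences_from_string string_input out) := by unfold Spec_get_digit_sequences_from_string; infer_instance

-- ===== CLAIM (what is proved, stated in full; the proofs are below) =====
def Claim_equal_get_digit_sequences_from_string : Prop := ∀ (string_input : String), Dom_get_digit_sequences_from_string string_input → Spec_get_digit_sequences_from_string string_input (get_digit_sequences_from_string string_input)

-- ===== LEMMAS AND PROOFS =====
theorem pvB_step (prev : Char) (rest : List Char) :
    pvB_go (prev :: rest) =
      (if PySem.Chars.isdigit prev then
        prev :: (if (match rest with | [] => false | c :: _ => PySem.Chars.isdigit c) then []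
                 else ['\n'])
       else []) ++ pvB_go rest := by
  by_cases hp : PySem.Chars.isdigit prev
  · cases rest with
    | nil => simp [pvB_go, hp]
    | cons c rest' =>
      by_cases hc : PySem.Chars.isdigit c
      · rw [pvB_go, pvB_go]
        simp [hp, hc]
      · rw [pvB_go]
        simp [hp, hc]
  · simp [pvB_go, hp]

theorem pvA_loop_eq (xs : List Char) :
    ∀ (prev nd : Char) (acc : List Char), PySem.Chars.isdigit nd = false →
      pvA_loop prev (xs ++ [nd]) acc = acc ++ pvB_go (prev :: xs) := by
  induction xs with
  | nil =>
    intro prev nd acc hnd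
    by_cases hp : PySem.Chars.isdigit prev <;>
      simp [pvA_loop, pvB_go, hp, hnd]
  | cons c xs' ih =>
    intro prev nd acc hnd
    have := ih c nd
      (acc ++ (if PySem.Chars.isdigit prev then
        prev :: (if PySem.Chars.isdigit c then [] else ['\n']) else [])) hnd
    rw [pvB_step]
    by_cases hp : PySem.Chars.isdigit prev <;>
      by_cases hc : PySem.Chars.isdigit c <;>
      simpa [pvA_loop, hp, hc] using this

-- ===== VERDICT (by name: the statement is the Claim_ definition above) =====
theorem get_digit_sequences_from_string_spec : Claim_equal_get_digit_sequences_from_string := by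
  intro s _
  unfold Spec_get_digit_sequences_from_string get_digit_sequences_from_string
    get_digit_sequences_from_string_alt
  cases h : s.toList with
  | nil => simp [pvB_go, pvA_loop]
  | cons c rest =>
    simp only [List.cons_append]
    rw [pvA_loop_eq rest c '_' [] (by decide)]
    simp
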